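-- pv_equiv track=rewrite | github.com/djpasseyjr/ReservoirSpecialization | specializeGraph.py | linkAdder
-- ===== SOURCE A (Python) =====
-- def linkAdder(path,nNodes,compnts):
--     """
--     Produces the links needed to add a branch of strongly connected
--     components to a graph with nNodes
--
--     Parameters
--     ----------
--     path (list of tuples): edges between component nodes
--     nNodes (int): number of nodes in the original graph
--     compnts (list of lists): list of lists of component nodes
--
--     Returns
--     -------
--     links (list of tuples): links that correspond with adding
--     a branch of connected components to the graph
--     """
--     links = []
--     lenP = len(path)
--     #TODO: Edge weights, loops
--
--     for i in range(lenP):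
--         if i == 0:
--             links.append((path[i][0]+nNodes-1,path[i][1]))
--         elif i == lenP - 1:
--             links.append((path[i][0],path[i][1]+nNodes-1))
--         else:
--             links.append((path[i][0]+nNodes-1,path[i][1]+nNodes-1))
--
--     return links
-- ===== SOURCE B (Python) =====
-- def linkAdder(path, nNodes, compnts):
--     # Structural recursion: peel off the first edge (source shifted), then
--     # recurse over the remaining edges; the recursion's base case is the last
--     # edge (target shifted), every other edge is fully shifted.
--     def tail(edges):
--         if not edges:
--             return []
--         a, b = edges[0]
--         if len(edges) == 1:
--             return [(a, b + nNodes - 1)]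
--         return [(a + nNodes - 1, b + nNodes - 1)] + tail(edges[1:])
--
--     if not path:
--         return []
--     a, b = path[0]
--     return [(a + nNodes - 1, b)] + tail(path[1:])
-- ===== Notes on version B (the rewrite author's own statement) =====
-- stated objective: alternative
-- what changed: Replaces A's indexed range-loop with positional if/elif cases by structural recursion on the edge list: the first edge is peeled off, and a recursive helper whose base case is the last edge handles the rest, with no index arithmetic.
import Mathlib
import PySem

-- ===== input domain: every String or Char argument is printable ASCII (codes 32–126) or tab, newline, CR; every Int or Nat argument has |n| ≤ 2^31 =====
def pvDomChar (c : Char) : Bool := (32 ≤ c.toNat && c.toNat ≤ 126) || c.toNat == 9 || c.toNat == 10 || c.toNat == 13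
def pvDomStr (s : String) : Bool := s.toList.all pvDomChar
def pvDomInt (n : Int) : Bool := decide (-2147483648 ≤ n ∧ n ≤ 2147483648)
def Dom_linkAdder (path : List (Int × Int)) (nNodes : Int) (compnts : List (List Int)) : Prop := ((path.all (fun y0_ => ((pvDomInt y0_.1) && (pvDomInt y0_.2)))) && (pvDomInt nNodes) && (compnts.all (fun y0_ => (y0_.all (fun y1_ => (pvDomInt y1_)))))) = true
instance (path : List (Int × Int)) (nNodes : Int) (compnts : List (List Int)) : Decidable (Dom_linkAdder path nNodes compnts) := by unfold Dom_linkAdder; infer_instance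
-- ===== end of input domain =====

-- B replaces A's indexed range-loop with positional if/elif cases by structural
-- recursion on the edge list (alternative decomposition, same O(n) cost).

-- ===== PORT A =====
def linkAdder (path : List (Int × Int)) (nNodes : Int) (compnts : List (List Int)) : List (Int × Int) :=
  let lenP : Int := path.length
  (PySem.List.pyRange 0 lenP 1).foldl (fun links i =>
    if i = 0 then
      links ++ [((PySem.List.pyGetD path i (0, 0)).1 + nNodes - 1, (PySem.List.pyGetD path i (0, 0)).2)]
    else if i = lenP - 1 then
      links ++ [((PySem.List.pyGetD path i (0, 0)).1, (PySem.List.pyGetD path i (0, 0)).2 + nNodes - 1)]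
    else
      links ++ [((PySem.List.pyGetD path i (0, 0)).1 + nNodes - 1, (PySem.List.pyGetD path i (0, 0)).2 + nNodes - 1)]) []

-- ===== PORT B =====
-- recursive helper `tail` of Source B: base case = last edge, otherwise full shift
def linkTail (nNodes : Int) : List (Int × Int) → List (Int × Int)
  | [] => []
  | [(a, b)] => [(a, b + nNodes - 1)]
  | (a, b) :: q :: rs => [(a + nNodes - 1, b + nNodes - 1)] ++ linkTail nNodes (q :: rs)

def linkAdder_alt (path : List (Int × Int)) (nNodes : Int) (compnts : List (List Int)) : List (Int × Int) :=
  match path with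
  | [] => []
  | (a, b) :: rest => [(a + nNodes - 1, b)] ++ linkTail nNodes rest

-- ===== PRECONDITION & SPEC =====
def Spec_linkAdder (path : List (Int × Int)) (nNodes : Int) (compnts : List (List Int)) (out : List (Int × Int)) : Prop := out = linkAdder_alt path nNodes compnts
instance (path : List (Int × Int)) (nNodes : Int) (compnts : List (List Int)) (out : List (Int × Int)) : Decidable (Spec_linkAdder path nNodes compnts out) := by unfold Spec_linkAdder; infer_instance

-- ===== CLAIM (what is proved, stated in full; the proofs are below) =====
def Claim_equal_linkAdder : Prop := ∀ (path : List (Int × Int)) (nNodes : Int) (compnts : List (List Int)), Dom_linkAdder path nNodes compnts → Spec_linkAdder path nNodes compnts (linkAdder path nNodes compnts)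

-- ===== LEMMAS AND PROOFS =====

-- the loop body of port A
def bodyA (path : List (Int × Int)) (n lenP : Int) (links : List (Int × Int)) (i : Int) : List (Int × Int) :=
  if i = 0 then
    links ++ [((PySem.List.pyGetD path i (0, 0)).1 + n - 1, (PySem.List.pyGetD path i (0, 0)).2)]
  else if i = lenP - 1 then
    links ++ [((PySem.List.pyGetD path i (0, 0)).1, (PySem.List.pyGetD path i (0, 0)).2 + n - 1)]
  else
    links ++ [((PySem.List.pyGetD path i (0, 0)).1 + n - 1, (PySem.List.pyGetD path i (0, 0)).2 + n - 1)]

lemma pyGetD_of_drop (path rest : List (Int × Int)) (p : Int × Int) (k : Nat)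
    (hdrop : path.drop k = p :: rest) :
    PySem.List.pyGetD path (k : Int) (0, 0) = p := by
  have hget : path[k]? = some p := by
    have h : (path.drop k)[0]? = path[k + 0]? := List.getElem?_drop
    rw [hdrop] at h
    simpa using h.symm
  simp [PySem.List.pyGetD_natCast, List.getD, hget]

lemma foldA_mid (path : List (Int × Int)) (n : Int) :
    ∀ (rest acc : List (Int × Int)) (k : Nat), 1 ≤ k → path.drop k = rest →
      k + rest.length = path.length →
      (PySem.List.pyRange (k : Int) (path.length : Int) 1).foldl (bodyA path n (path.length : Int)) acc
        = acc ++ linkTail n rest := by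
  intro rest
  induction rest with
  | nil =>
    intro acc k _ _ hlen
    simp only [List.length_nil, Nat.add_zero] at hlen
    have : (path.length : Int) ≤ (k : Int) := by omega
    rw [PySem.List.pyRange_one_eq_nil this]
    simp [linkTail]
  | cons p rs ih =>
    intro acc k hk1 hdrop hlen
    simp only [List.length_cons] at hlen
    have hklt : (k : Int) < (path.length : Int) := by omega
    rw [PySem.List.pyRange_one_cons hklt]
    have hget := pyGetD_of_drop path rs p k hdrop
    have hkne0 : (k : Int) ≠ 0 := by omega
    have hdrop' : path.drop (k + 1) = rs := by
      have h := congrArg (List.drop 1) hdrop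
      simpa [List.drop_drop] using h
    cases rs with
    | nil =>
      simp only [List.length_nil] at hlen
      have hlast : (k : Int) = (path.length : Int) - 1 := by omega
      have hend : (path.length : Int) ≤ (k : Int) + 1 := by omega
      simp only [List.foldl_cons, bodyA, hget, if_neg hkne0, if_pos hlast]
      rw [PySem.List.pyRange_one_eq_nil hend]
      simp [linkTail]
    | cons q rs' =>
      have hmid : (k : Int) ≠ (path.length : Int) - 1 := by
        simp only [List.length_cons] at hlen; omega
      simp only [List.foldl_cons, bodyA, hget, if_neg hkne0, if_neg hmid]
      have hrec := ih (acc ++ [(p.1 + n - 1, p.2 + n - 1)]) (k + 1) (by omega) hdrop'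
        (by simp only [List.length_cons] at hlen ⊢; omega)
      have hcast : ((k : Int) + 1) = ((k + 1 : Nat) : Int) := by push_cast; ring
      rw [hcast, hrec]
      simp [linkTail]

-- ===== VERDICT (by name: the statement is the Claim_ definition above) =====
theorem linkAdder_spec : Claim_equal_linkAdder := by
  intro path n c _
  show linkAdder path n c = linkAdder_alt path n c
  cases path with
  | nil => simp [linkAdder, linkAdder_alt, PySem.List.pyRange]
  | cons p0 rest =>
    show (PySem.List.pyRange 0 ((p0 :: rest).length : Int) 1).foldl
        (bodyA (p0 :: rest) n ((p0 :: rest).length : Int)) [] = _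
    have h0 : (0 : Int) < ((p0 :: rest).length : Int) := by simp
    rw [PySem.List.pyRange_one_cons h0]
    have hget0 : PySem.List.pyGetD (p0 :: rest) 0 (0, 0) = p0 := by
      simpa using pyGetD_of_drop (p0 :: rest) rest p0 0 (by simp)
    simp only [List.foldl_cons]
    have hb : bodyA (p0 :: rest) n ((p0 :: rest).length : Int) [] 0 = [(p0.1 + n - 1, p0.2)] := by
      simp [bodyA, hget0]
    rw [hb, show (0 : Int) + 1 = ((1 : Nat) : Int) by norm_num]
    rw [foldA_mid (p0 :: rest) n rest [(p0.1 + n - 1, p0.2)] 1 (by omega) (by simp) (by simp [Nat.add_comm])]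
    simp [linkAdder_alt]
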